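-- pv_equiv track=rewrite | github.com/YQ-7/CodeInterviewGuide | 8_arr_and_matrix/get_add_max_length.py | get_neg_pos_max_length
-- ===== SOURCE A (Python) =====
-- def get_neg_pos_max_length(arr):
--     """
--     题目：
--         给定一个无序数组arr，其中元素可正、可负、可0。求arr所有的子数组中正数与负数个数相等的最长子数组长度
--     """
--     if arr is None or len(arr) == 0:
--         return 0
--     sum_map = {0: -1}   # 避免漏掉从0开始的子数组
--     max_len = 0
--     add_sum = 0
--     for i in range(len(arr)):
--         if arr[i] > 0:
--             add_sum += 1
--         elif arr[i] < 0:
--             add_sum -= 1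
--         if sum_map.get(add_sum) is not None:
--             max_len = max(max_len, i - sum_map.get(add_sum))
--         if sum_map.get(add_sum) is None:
--             sum_map[add_sum] = i
--     return max_len
-- ===== SOURCE B (Python) =====
-- def get_neg_pos_max_length(arr):
--     if arr is None or len(arr) == 0:
--         return 0
--     # pass 1: prefix balance array (balance = #positives - #negatives so far)
--     prefixes = [0]
--     for x in arr:
--         prefixes.append(prefixes[-1] + ((x > 0) - (x < 0)))
--     # pass 2: last occurrence of each balance, by plain overwrite
--     last = {}
--     for j, p in enumerate(prefixes):
--         last[p] = j
--     # pass 3: furthest equal balance to the right of each position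
--     best = 0
--     for j, p in enumerate(prefixes):
--         best = max(best, last[p] - j)
--     return best
-- ===== Notes on version B (the rewrite author's own statement) =====
-- stated objective: alternative
-- what changed: Replaces A's single pass with an online hashmap of first prefix-sum occurrences and a running maximum by a three-pass scheme: build the whole prefix-balance array, build a last-occurrence dictionary by unconditional overwrite, then maximise last[p] - j over all positions.
import Mathlib
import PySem

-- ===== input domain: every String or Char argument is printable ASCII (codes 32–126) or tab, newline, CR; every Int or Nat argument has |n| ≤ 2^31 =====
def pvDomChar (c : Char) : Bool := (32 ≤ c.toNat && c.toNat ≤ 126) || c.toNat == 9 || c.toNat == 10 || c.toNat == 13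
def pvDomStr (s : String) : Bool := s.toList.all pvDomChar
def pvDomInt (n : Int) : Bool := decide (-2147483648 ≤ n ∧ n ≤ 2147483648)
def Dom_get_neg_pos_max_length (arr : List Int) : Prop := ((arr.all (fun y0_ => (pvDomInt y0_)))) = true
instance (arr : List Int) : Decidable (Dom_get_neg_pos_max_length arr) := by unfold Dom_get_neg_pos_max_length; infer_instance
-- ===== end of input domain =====

-- B replaces A's online first-occurrence hashmap with running maximum by three passes:
-- prefix-balance array, last-occurrence dictionary by plain overwrite, then max of last[p] - j.

-- ===== PORT A =====
-- the loop 'for i in range(len(arr))' carrying (sum_map, max_len, add_sum); the two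
-- mutually exclusive 'if get is not None' / 'if get is None' checks become one match.
def pvGoA : List Int → Int → PySem.Dict Int Int → Int → Int → Int
  | [], _, _, maxLen, _ => maxLen
  | x :: xs, i, m, maxLen, addSum =>
    let addSum' := if x > 0 then addSum + 1 else if x < 0 then addSum - 1 else addSum
    match PySem.Dict.get? m addSum' with
    | some v => pvGoA xs (i + 1) m (max maxLen (i - v)) addSum'
    | none => pvGoA xs (i + 1) (PySem.Dict.insert m addSum' i) maxLen addSum'

def get_neg_pos_max_length (arr : List Int) : Int :=
  if arr.length = 0 then 0
  else pvGoA arr 0 (PySem.Dict.insert PySem.Dict.empty 0 (-1)) 0 0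

-- ===== PORT B =====
-- 'prefixes.append(prefixes[-1] + ((x > 0) - (x < 0)))'; prefixes is never empty so
-- pyGetD _ (-1) 0 is exact.
def pvBuildB : List Int → List Int → List Int
  | ps, [] => ps
  | ps, x :: xs =>
    pvBuildB (ps ++ [PySem.List.pyGetD ps (-1) 0 + (if x > 0 then 1 else if x < 0 then -1 else 0)]) xs

-- 'for j, p in enumerate(prefixes): last[p] = j'
def pvLastB : List (Int × Int) → PySem.Dict Int Int → PySem.Dict Int Int
  | [], d => d
  | (j, p) :: rest, d => pvLastB rest (PySem.Dict.insert d p j)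

-- 'for j, p in enumerate(prefixes): best = max(best, last[p] - j)';
-- p is always a key of last, so getD 0 is exact (last[p] never raises here).
def pvScanB : List (Int × Int) → PySem.Dict Int Int → Int → Int
  | [], _, best => best
  | (j, p) :: rest, lastD, best => pvScanB rest lastD (max best (PySem.Dict.getD lastD p 0 - j))

def get_neg_pos_max_length_alt (arr : List Int) : Int :=
  if arr.length = 0 then 0
  else
    let prefixes := pvBuildB [0] arr
    let lastD := pvLastB (PySem.List.enumerate prefixes) PySem.Dict.empty
    pvScanB (PySem.List.enumerate prefixes) lastD 0

-- ===== PRECONDITION & SPEC =====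
def Spec_get_neg_pos_max_length (arr : List Int) (out : Int) : Prop := out = get_neg_pos_max_length_alt arr
instance (arr : List Int) (out : Int) : Decidable (Spec_get_neg_pos_max_length arr out) := by unfold Spec_get_neg_pos_max_length; infer_instance

-- ===== CLAIM (what is proved, stated in full; the proofs are below) =====
def Claim_equal_get_neg_pos_max_length : Prop := ∀ (arr : List Int), Dom_get_neg_pos_max_length arr → Spec_get_neg_pos_max_length arr (get_neg_pos_max_length arr)

-- ===== LEMMAS AND PROOFS =====

/-- The increment both programs add to the running balance. -/
def pvSign (x : Int) : Int := if x > 0 then 1 else if x < 0 then -1 else 0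

/-- The prefix balances produced after starting value `s`. -/
def pvPfx : Int → List Int → List Int
  | _, [] => []
  | s, x :: xs => (s + pvSign x) :: pvPfx (s + pvSign x) xs

/-- First index of `v` in `l` as an integer (total since we only use it for `v ∈ l`). -/
def pvFirst (l : List Int) (v : Int) : Int := (((PySem.List.index? l v).getD 0 : Nat) : Int)

/-- Last index of `v` in `l` as an integer (first index in the reversed list, flipped). -/
def pvLast (l : List Int) (v : Int) : Int := (l.length : Int) - 1 - pvFirst l.reverse v

/-- Proof-side description of A's loop: running maximum of `j - pvFirst P p`. -/
def pvScanFirst : List Int → Int → List Int → Int → Int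
  | [], _, _, best => best
  | p :: rest, j, prefixes, best =>
    pvScanFirst rest (j + 1) prefixes (max best (j - pvFirst prefixes p))

theorem pvFirst_append_of_mem (pre t : List Int) (v : Int) (h : v ∈ pre) :
    pvFirst (pre ++ t) v = pvFirst pre v := by
  unfold pvFirst
  rw [PySem.List.index?_append_of_mem t h]

theorem pvFirst_append_self (pre : List Int) (v : Int) (h : v ∉ pre) :
    pvFirst (pre ++ [v]) v = (pre.length : Int) := by
  unfold pvFirst
  rw [PySem.List.index?_append_singleton_self pre v h]
  simp

theorem pvBuildB_eq (xs : List Int) : ∀ (ps : List Int) (h : ps ≠ []),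
    pvBuildB ps xs = ps ++ pvPfx (ps.getLast h) xs := by
  induction xs with
  | nil => intro ps h; simp [pvBuildB, pvPfx]
  | cons x xs ih =>
    intro ps h
    have hget : PySem.List.pyGetD ps (-1) 0 = ps.getLast h := PySem.List.pyGetD_neg_one ps 0 h
    have hsign : (if x > 0 then (1:Int) else if x < 0 then -1 else 0) = pvSign x := by
      simp [pvSign]
    rw [pvBuildB, hget, hsign, ih (ps ++ [ps.getLast h + pvSign x]) (by simp)]
    rw [List.getLast_append_singleton]
    simp [pvPfx, pvSign]

/-- Main invariant: A's loop over the remaining elements equals the first-occurrence scan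
over the remaining prefixes, when `m` maps each balance in the processed prefixes `pre` to
(first index of that balance in `pre`) − 1. -/
theorem pvMain : ∀ (xs pre : List Int) (m : PySem.Dict Int Int) (maxLen addSum : Int),
    (∀ v : Int, PySem.Dict.get? m v
      = if v ∈ pre then some (pvFirst pre v - 1) else none) →
    0 ≤ maxLen →
    pvGoA xs ((pre.length : Int) - 1) m maxLen addSum
      = pvScanFirst (pvPfx addSum xs) (pre.length : Int) (pre ++ pvPfx addSum xs) maxLen := by
  intro xs
  induction xs with
  | nil => intro pre m maxLen addSum _ _; simp [pvGoA, pvPfx, pvScanFirst]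
  | cons x xs ih =>
    intro pre m maxLen addSum hm hml
    have hsum : (if x > 0 then addSum + 1 else if x < 0 then addSum - 1 else addSum)
        = addSum + pvSign x := by
      simp [pvSign]; split_ifs <;> ring
    set s' := addSum + pvSign x with hs'
    rw [pvGoA, hsum]
    rw [show pvPfx addSum (x :: xs) = s' :: pvPfx s' xs from rfl]
    have hsplit : pre ++ s' :: pvPfx s' xs = (pre ++ [s']) ++ pvPfx s' xs := by simp
    by_cases hmem : s' ∈ pre
    · -- balance seen before: A updates max_len, map unchanged
      rw [hm s', if_pos hmem, pvScanFirst]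
      have hterm : pvFirst (pre ++ s' :: pvPfx s' xs) s' = pvFirst pre s' :=
        pvFirst_append_of_mem pre _ s' hmem
      have harith : ((pre.length : Int) - 1) - (pvFirst pre s' - 1)
          = (pre.length : Int) - pvFirst pre s' := by ring
      rw [hterm]
      have hm' : ∀ v : Int, PySem.Dict.get? m v
          = if v ∈ pre ++ [s'] then some (pvFirst (pre ++ [s']) v - 1) else none := by
        intro v
        rw [hm v]
        by_cases hv : v ∈ pre
        · rw [if_pos hv, if_pos (by simp [hv]), pvFirst_append_of_mem pre [s'] v hv]
        · rw [if_neg hv, if_neg (by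
            simp only [List.mem_append, List.mem_singleton]
            rintro (h | rfl) <;> [exact hv h; exact hv hmem])]
      have := ih (pre ++ [s']) m (max maxLen (((pre.length : Int) - 1) - (pvFirst pre s' - 1))) s' hm'
        (le_trans hml (le_max_left _ _))
      rw [hsplit]
      simpa [harith] using this
    · -- fresh balance: A records it, the scan's term is 0
      rw [hm s', if_neg hmem, pvScanFirst]
      have hterm : pvFirst (pre ++ s' :: pvPfx s' xs) s' = (pre.length : Int) := by
        rw [hsplit, pvFirst_append_of_mem (pre ++ [s']) _ s' (by simp),
          pvFirst_append_self pre s' hmem]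
      have hmax : max maxLen ((pre.length : Int) - (pre.length : Int)) = maxLen := by
        simp [hml]
      have hm' : ∀ v : Int, PySem.Dict.get? (PySem.Dict.insert m s' ((pre.length : Int) - 1)) v
          = if v ∈ pre ++ [s'] then some (pvFirst (pre ++ [s']) v - 1) else none := by
        intro v
        rw [PySem.Dict.get?_insert]
        by_cases hv : v = s'
        · subst hv
          rw [if_pos rfl, if_pos (by simp), pvFirst_append_self pre s' hmem]
        · rw [if_neg hv, hm v]
          by_cases hvp : v ∈ pre
          · rw [if_pos hvp, if_pos (by simp [hvp]), pvFirst_append_of_mem pre [s'] v hvp]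
          · rw [if_neg hvp, if_neg (by
              simp only [List.mem_append, List.mem_singleton]
              rintro (h | rfl) <;> [exact hvp h; exact hv rfl])]
      have := ih (pre ++ [s']) (PySem.Dict.insert m s' ((pre.length : Int) - 1)) maxLen s' hm' hml
      rw [hterm, hmax, hsplit]
      simpa using this

-- ---- specifications of pvFirst / pvLast as first / last occurrence ----

theorem pvFirst_spec (l : List Int) (v : Int) (h : v ∈ l) :
    ∃ k : Nat, pvFirst l v = (k : Int) ∧ ∃ hk : k < l.length, l[k] = v ∧
      ∀ j, (hj : j < l.length) → l[j] = v → k ≤ j := by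
  obtain ⟨k, hk⟩ := Option.isSome_iff_exists.mp ((PySem.List.index?_isSome_iff l v).mpr h)
  obtain ⟨hlt, hget, hfirst⟩ := PySem.List.getElem_of_index?_eq_some hk
  refine ⟨k, ?_, hlt, hget, ?_⟩
  · unfold pvFirst; rw [hk]; rfl
  · intro j hj hjv
    by_contra hlt'
    exact hfirst j (by omega) hjv

theorem pvLast_spec (l : List Int) (v : Int) (h : v ∈ l) :
    ∃ k : Nat, pvLast l v = (k : Int) ∧ ∃ hk : k < l.length, l[k] = v ∧
      ∀ j, (hj : j < l.length) → l[j] = v → j ≤ k := by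
  obtain ⟨k', hk', ⟨hlt', hget', hmin'⟩⟩ := pvFirst_spec l.reverse v (by simpa using h)
  have hlen : l.reverse.length = l.length := List.length_reverse
  refine ⟨l.length - 1 - k', ?_, by omega, ?_, ?_⟩
  · unfold pvLast
    rw [hk']
    omega
  · have := hget'
    rw [List.getElem_reverse] at this
    simpa [hlen] using this
  · intro j hj hjv
    have : k' ≤ l.length - 1 - j := by
      apply hmin' (l.length - 1 - j) (by omega)
      rw [List.getElem_reverse]
      have hidx : l.length - 1 - (l.length - 1 - j) = j := by omega
      simpa [hidx] using hjv
    omega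

theorem pvLast_append_self (l : List Int) (x : Int) :
    pvLast (l ++ [x]) x = (l.length : Int) := by
  unfold pvLast pvFirst
  rw [List.reverse_append, show (([x] : List Int).reverse ++ l.reverse) = x :: l.reverse from by simp,
    PySem.List.index?_cons_self]
  simp

theorem pvLast_append_ne (l : List Int) (x v : Int) (hne : v ≠ x) (hv : v ∈ l) :
    pvLast (l ++ [x]) v = pvLast l v := by
  unfold pvLast pvFirst
  rw [List.reverse_append, show (([x] : List Int).reverse ++ l.reverse) = x :: l.reverse from by simp,
    PySem.List.index?_cons_of_ne l.reverse (fun he => hne he.symm)]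
  obtain ⟨k, hk⟩ := Option.isSome_iff_exists.mp
    ((PySem.List.index?_isSome_iff l.reverse v).mpr (by simpa using hv))
  rw [hk]
  simp only [Option.map_some, Option.getD_some, List.length_append, List.length_singleton]
  push_cast
  ring

-- ---- the last-occurrence dictionary ----

theorem pvLastB_append (a b : List (Int × Int)) (d : PySem.Dict Int Int) :
    pvLastB (a ++ b) d = pvLastB b (pvLastB a d) := by
  induction a generalizing d with
  | nil => rfl
  | cons p rest ih => obtain ⟨j, v⟩ := p; simp [pvLastB, ih]

theorem pvLastB_get? (l : List Int) (d : PySem.Dict Int Int) (v : Int) :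
    PySem.Dict.get? (pvLastB (PySem.List.enumerate l) d) v
      = if v ∈ l then some (pvLast l v) else PySem.Dict.get? d v := by
  induction l using List.reverseRecOn generalizing d with
  | nil => simp [PySem.List.enumerate_nil, pvLastB]
  | append_singleton l x ih =>
    rw [show PySem.List.enumerate (l ++ [x]) = PySem.List.enumerate (l ++ [x]) 0 from rfl,
      PySem.List.enumerate_append,
      show PySem.List.enumerate [x] (0 + l.length) = [((l.length : Int), x)] by
        simp [PySem.List.enumerate_cons, PySem.List.enumerate_nil],
      pvLastB_append]
    rw [show pvLastB [((l.length : Int), x)] (pvLastB (PySem.List.enumerate l) d)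
        = PySem.Dict.insert (pvLastB (PySem.List.enumerate l) d) x (l.length : Int) from rfl]
    rw [PySem.Dict.get?_insert]
    by_cases hv : v = x
    · subst hv
      rw [if_pos rfl, if_pos (by simp), pvLast_append_self]
    · rw [if_neg hv, ih d]
      by_cases hvl : v ∈ l
      · rw [if_pos hvl, if_pos (by simp [hvl]), pvLast_append_ne l x v hv hvl]
      · rw [if_neg hvl, if_neg (by
          simp only [List.mem_append, List.mem_singleton]
          rintro (h | rfl) <;> [exact hvl h; exact hv rfl])]

-- ---- folding max ----

theorem le_foldl_max (l : List Int) (c : Int) : c ≤ l.foldl max c := by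
  induction l generalizing c with
  | nil => exact le_rfl
  | cons x xs ih => exact le_trans (le_max_left c x) (ih (max c x))

theorem mem_le_foldl_max (l : List Int) (c a : Int) (h : a ∈ l) : a ≤ l.foldl max c := by
  induction l generalizing c with
  | nil => cases h
  | cons x xs ih =>
    rcases List.mem_cons.mp h with rfl | h'
    · exact le_trans (le_max_right c a) (le_foldl_max xs (max c a))
    · exact ih (max c x) h'

theorem foldl_max_le (l : List Int) (c d : Int) (hc : c ≤ d) (h : ∀ a ∈ l, a ≤ d) :
    l.foldl max c ≤ d := by
  induction l generalizing c with
  | nil => exact hc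
  | cons x xs ih =>
    exact ih (max c x) (max_le hc (h x (by simp))) (fun a ha => h a (by simp [ha]))

/-- Two running maxima agree when each term of either list is dominated by some term
of the other. -/
theorem foldl_max_eq (t u : List Int) (c : Int)
    (htu : ∀ a ∈ t, ∃ b ∈ u, a ≤ b) (hut : ∀ a ∈ u, ∃ b ∈ t, a ≤ b) :
    t.foldl max c = u.foldl max c := by
  apply le_antisymm
  · exact foldl_max_le t c _ (le_foldl_max u c)
      (fun a ha => by obtain ⟨b, hb, hab⟩ := htu a ha; exact le_trans hab (mem_le_foldl_max u c b hb))
  · exact foldl_max_le u c _ (le_foldl_max t c)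
      (fun a ha => by obtain ⟨b, hb, hab⟩ := hut a ha; exact le_trans hab (mem_le_foldl_max t c b hb))

-- ---- scans as folds ----

theorem pvScanFirst_eq_foldl (l : List Int) : ∀ (j : Int) (P : List Int) (best : Int),
    pvScanFirst l j P best
      = ((PySem.List.enumerate l j).map (fun jp => jp.1 - pvFirst P jp.2)).foldl max best := by
  induction l with
  | nil => intro j P best; simp [pvScanFirst, PySem.List.enumerate_nil]
  | cons p rest ih =>
    intro j P best
    rw [pvScanFirst, PySem.List.enumerate_cons, List.map_cons, List.foldl_cons, ih]

theorem pvScanB_eq_foldl (pairs : List (Int × Int)) :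
    ∀ (L : PySem.Dict Int Int) (best : Int),
    pvScanB pairs L best
      = (pairs.map (fun jp => PySem.Dict.getD L jp.2 0 - jp.1)).foldl max best := by
  induction pairs with
  | nil => intro L best; simp [pvScanB]
  | cons p rest ih =>
    intro L best
    obtain ⟨j, v⟩ := p
    rw [pvScanB, List.map_cons, List.foldl_cons, ih]

-- ---- the two maxima coincide ----

theorem pvFirstLast_max_eq (P : List Int) :
    ((PySem.List.enumerate P).map (fun jp => jp.1 - pvFirst P jp.2)).foldl max 0
      = ((PySem.List.enumerate P).map (fun jp => pvLast P jp.2 - jp.1)).foldl max 0 := by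
  apply foldl_max_eq
  · intro a ha
    obtain ⟨jp, hjp, rfl⟩ := List.mem_map.mp ha
    obtain ⟨k, hk, rfl⟩ := (PySem.List.mem_enumerate_iff _ _ _).mp hjp
    have hmem : P[k] ∈ P := List.getElem_mem hk
    obtain ⟨f, hf, hflt, hfget, hfmin⟩ := pvFirst_spec P P[k] hmem
    obtain ⟨g, hg, hglt, hgget, hgmax⟩ := pvLast_spec P P[f] (List.getElem_mem hflt)
    have hg' : pvLast P P[k] = (g : Int) := hfget ▸ hg
    refine ⟨pvLast P P[f] - (f : Int), List.mem_map.mpr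
      ⟨((f : Int), P[f]), (PySem.List.mem_enumerate_iff _ _ _).mpr ⟨f, hflt, by simp⟩, rfl⟩, ?_⟩
    have hkg : k ≤ g := hgmax k hk (by rw [hfget])
    simp only [hfget, hf, hg']
    omega
  · intro a ha
    obtain ⟨jp, hjp, rfl⟩ := List.mem_map.mp ha
    obtain ⟨k, hk, rfl⟩ := (PySem.List.mem_enumerate_iff _ _ _).mp hjp
    have hmem : P[k] ∈ P := List.getElem_mem hk
    obtain ⟨g, hg, hglt, hgget, hgmax⟩ := pvLast_spec P P[k] hmem
    obtain ⟨f, hf, hflt, hfget, hfmin⟩ := pvFirst_spec P P[g] (List.getElem_mem hglt)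
    have hf' : pvFirst P P[k] = (f : Int) := hgget ▸ hf
    refine ⟨(g : Int) - pvFirst P P[g], List.mem_map.mpr
      ⟨((g : Int), P[g]), (PySem.List.mem_enumerate_iff _ _ _).mpr ⟨g, hglt, by simp⟩, rfl⟩, ?_⟩
    have hfk : f ≤ k := by
      apply hfmin k hk
      rw [hgget]
    simp only [hgget, hf', hg]
    omega

-- ===== VERDICT (by name: the statement is the Claim_ definition above) =====
theorem get_neg_pos_max_length_spec : Claim_equal_get_neg_pos_max_length := by
  intro arr _
  unfold Spec_get_neg_pos_max_length get_neg_pos_max_length get_neg_pos_max_length_alt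
  by_cases h : arr.length = 0
  · simp [h]
  · rw [if_neg h, if_neg h]
    have hbuild : pvBuildB [0] arr = [0] ++ pvPfx 0 arr := by
      simpa using pvBuildB_eq arr [0] (by simp)
    set P : List Int := [0] ++ pvPfx 0 arr with hP
    -- A's side: the invariant reduces A to the first-occurrence scan over P
    have hm0 : ∀ v : Int, PySem.Dict.get? (PySem.Dict.insert PySem.Dict.empty 0 (-1)) v
        = if v ∈ ([0] : List Int) then some (pvFirst [0] v - 1) else none := by
      intro v
      rw [PySem.Dict.get?_insert]
      by_cases hv : v = 0
      · subst hv; simp [pvFirst]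
      · simp [hv, PySem.Dict.get?_empty]
    have hmain := pvMain arr [0] (PySem.Dict.insert PySem.Dict.empty 0 (-1)) 0 0 hm0 le_rfl
    norm_num at hmain
    have hA : pvGoA arr 0 (PySem.Dict.insert PySem.Dict.empty 0 (-1)) 0 0
        = ((PySem.List.enumerate P).map (fun jp => jp.1 - pvFirst P jp.2)).foldl max 0 := by
      rw [hmain, pvScanFirst_eq_foldl]
      rw [show P = (0 : Int) :: pvPfx 0 arr from rfl]
      rw [show PySem.List.enumerate ((0 : Int) :: pvPfx 0 arr)
          = ((0 : Int), (0 : Int)) :: PySem.List.enumerate (pvPfx 0 arr) 1 from by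
        rw [show PySem.List.enumerate ((0 : Int) :: pvPfx 0 arr)
            = PySem.List.enumerate ((0 : Int) :: pvPfx 0 arr) 0 from rfl,
          PySem.List.enumerate_cons]
        norm_num]
      rw [List.map_cons, List.foldl_cons]
      have h0 : pvFirst ((0 : Int) :: pvPfx 0 arr) 0 = 0 := by
        unfold pvFirst
        rw [PySem.List.index?_cons_self]
        rfl
      rw [h0]
      norm_num
    -- B's side: the last-occurrence dictionary holds pvLast
    have hgetD : ∀ jp ∈ PySem.List.enumerate P,
        PySem.Dict.getD (pvLastB (PySem.List.enumerate P) PySem.Dict.empty) jp.2 0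
          = pvLast P jp.2 := by
      intro jp hjp
      obtain ⟨k, hk, rfl⟩ := (PySem.List.mem_enumerate_iff _ _ _).mp hjp
      rw [PySem.Dict.getD_eq_get?_getD, pvLastB_get?, if_pos (List.getElem_mem hk)]
      rfl
    show pvGoA arr 0 (PySem.Dict.insert PySem.Dict.empty 0 (-1)) 0 0
        = pvScanB (PySem.List.enumerate (pvBuildB [0] arr))
            (pvLastB (PySem.List.enumerate (pvBuildB [0] arr)) PySem.Dict.empty) 0
    have hmap : List.map (fun jp => PySem.Dict.getD (pvLastB (PySem.List.enumerate P) PySem.Dict.empty) jp.2 0 - jp.1) (PySem.List.enumerate P)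
        = List.map (fun jp => pvLast P jp.2 - jp.1) (PySem.List.enumerate P) :=
      List.map_congr_left (fun jp hjp => by rw [hgetD jp hjp])
    rw [hbuild, pvScanB_eq_foldl, hmap, hA, pvFirstLast_max_eq]
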